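-- pv_equiv track=rewrite | github.com/inon-peled/advent_of_code | y2017/d02/part2.py | solve
-- ===== SOURCE A (Python) =====
-- def solve(board):
--     total = 0
--     for row in board:
--         for i in range(len(row) - 1):
--             for j in range(i + 1, len(row)):
--                 n1 = row[i]
--                 n2 = row[j]
--                 mx = max(n1, n2)
--                 mn = min(n1, n2)
--                 if mx % mn == 0:
--                     total += (mx // mn)
--     return total
-- ===== SOURCE B (Python) =====
-- def solve(board):
--     total = 0
--     for row in board:
--         cnt = {}
--         for x in row:
--             cnt[x] = cnt.get(x, 0) + 1
--         vals = sorted(cnt)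
--         while vals:
--             lo = vals[0]
--             vals = vals[1:]
--             c = cnt[lo]
--             total += c * (c - 1) // 2
--             for hi in vals:
--                 if hi % lo == 0:
--                     total += (hi // lo) * c * cnt[hi]
--     return total
-- ===== Notes on version B (the rewrite author's own statement) =====
-- stated objective: alternative
-- what changed: B replaces A's double index loop over all element pairs of each row by a counting dictionary plus one ordered scan over the sorted distinct values: duplicate pairs are settled in closed form (c*(c-1)//2, quotient 1) and each distinct value pair is weighted by the product of its counts, with min/max resolved by the sort order instead of per-pair max()/min().
import Mathlib
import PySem

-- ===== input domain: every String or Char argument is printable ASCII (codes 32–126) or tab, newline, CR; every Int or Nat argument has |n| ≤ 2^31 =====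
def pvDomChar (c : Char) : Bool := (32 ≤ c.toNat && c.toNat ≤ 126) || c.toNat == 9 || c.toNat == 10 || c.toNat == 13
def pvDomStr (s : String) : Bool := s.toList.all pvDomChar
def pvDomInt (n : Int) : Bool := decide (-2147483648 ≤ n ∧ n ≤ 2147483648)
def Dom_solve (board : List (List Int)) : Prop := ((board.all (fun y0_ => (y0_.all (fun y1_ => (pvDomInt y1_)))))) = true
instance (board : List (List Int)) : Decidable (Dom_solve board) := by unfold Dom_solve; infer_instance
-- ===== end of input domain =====

-- B replaces A's all-pairs double index loop per row by a count dictionary plus one scan over the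
-- sorted distinct values (duplicate pairs in closed form, distinct value pairs weighted by count
-- products); objective: alternative — same worst-case cost, less work on duplicate-heavy rows.


-- ===== PORT A =====
def solve (board : List (List Int)) : Int :=
  board.foldl (fun total row =>
    (PySem.List.pyRange 0 ((row.length : Int) - 1)).foldl (fun total i =>
      (PySem.List.pyRange (i + 1) (row.length : Int)).foldl (fun total j =>
        let n1 := PySem.List.pyGetD row i 0
        let n2 := PySem.List.pyGetD row j 0
        let mx := max n1 n2
        let mn := min n1 n2
        if PySem.Int.mod mx mn = 0 then total + PySem.Int.floordiv mx mn else total)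
        total)
      total)
    0

-- ===== PORT B =====
-- B's while loop over the shrinking sorted value list (lo = vals[0]; vals = vals[1:])
def solveAltRow (cnt : PySem.Dict Int Int) : List Int → Int → Int
  | [], total => total
  | lo :: vals, total =>
      let c := cnt.getD lo 0
      let total := total + PySem.Int.floordiv (c * (c - 1)) 2
      let total := vals.foldl (fun t hi =>
        if PySem.Int.mod hi lo = 0 then t + PySem.Int.floordiv hi lo * c * cnt.getD hi 0 else t) total
      solveAltRow cnt vals total

def solve_alt (board : List (List Int)) : Int :=
  board.foldl (fun total row =>
    let cnt := row.foldl (fun d x => d.insert x (d.getD x 0 + 1)) PySem.Dict.empty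
    let vals := PySem.List.sorted cnt.keys (fun v => v) false
    solveAltRow cnt vals total) 0

-- ===== PRECONDITION & SPEC =====
-- Pre_solve excludes exactly the boards on which A raises ZeroDivisionError: some row holding a
-- pair whose minimum is 0, i.e. two zeros in a row, or a zero together with a positive entry.
def Pre_solve (board : List (List Int)) : Prop :=
  ∀ row ∈ board, row.count 0 ≤ 1 ∧ (0 ∈ row → ∀ x ∈ row, x ≤ 0)
instance (board : List (List Int)) : Decidable (Pre_solve board) := by unfold Pre_solve; infer_instance
def pvWitness_solve : List (List Int) := [[5, 9, 2, 8], [9, 4, 7, 3], [3, 8, 6, 5]]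

def Spec_solve (board : List (List Int)) (out : Int) : Prop := out = solve_alt board
instance (board : List (List Int)) (out : Int) : Decidable (Spec_solve board out) := by unfold Spec_solve; infer_instance

-- ===== CLAIM (what is proved, stated in full; the proofs are below) =====
def Claim_equal_solve : Prop := ∀ (board : List (List Int)), Dom_solve board → Pre_solve board → Spec_solve board (solve board)

-- ===== LEMMAS AND PROOFS =====

-- the per-pair contribution both programs add for an unordered pair of entries
def pvF (a b : Int) : Int :=
  if PySem.Int.mod (max a b) (min a b) = 0 then PySem.Int.floordiv (max a b) (min a b) else 0

-- sum of g over all ordered index pairs i < j of a list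
def pvP (g : Int → Int → Int) : List Int → Int
  | [] => 0
  | x :: xs => (xs.map (g x)).sum + pvP g xs

-- B's per-pair term on distinct values, weighted by the counts
def pvC (l : List Int) (v : Int) : Int := (l.count v : Int)
def pvG (l : List Int) (v w : Int) : Int :=
  if PySem.Int.mod w v = 0 then PySem.Int.floordiv w v * pvC l v * pvC l w else 0
def pvVals (l : List Int) : List Int := PySem.List.sorted (PySem.Set.ofList l) (fun v => v) false

lemma pvF_comm (a b : Int) : pvF a b = pvF b a := by
  simp [pvF, max_comm, min_comm]

lemma pvP_add (g1 g2 : Int → Int → Int) (k : List Int) :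
    pvP (fun a b => g1 a b + g2 a b) k = pvP g1 k + pvP g2 k := by
  induction k with
  | nil => simp [pvP]
  | cons x xs ih => simp [pvP, ih]; ring

lemma pvP_two (g : Int → Int → Int) (k : List Int) :
    pvP (fun a b => 2 * g a b) k = 2 * pvP g k := by
  have h : (fun (a b : Int) => 2 * g a b) = fun a b => g a b + g a b := by
    funext a b; ring
  rw [h, pvP_add]; ring

lemma pvP_congr_pairwise {R : Int → Int → Prop} (g1 g2 : Int → Int → Int) (k : List Int)
    (hp : k.Pairwise R) (h : ∀ a b, R a b → g1 a b = g2 a b) : pvP g1 k = pvP g2 k := by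
  induction k with
  | nil => rfl
  | cons x xs ih =>
      rcases List.pairwise_cons.mp hp with ⟨hx, hxs⟩
      simp only [pvP, ih hxs]
      congr 1
      exact congrArg _ (List.map_congr_left fun b hb => h x b (hx b hb))

-- decomposition of a double sum into diagonal plus both orientations of the index pairs
lemma pvDouble (h : Int → Int → Int) (k : List Int) :
    (k.map (fun v => (k.map (h v)).sum)).sum
      = (k.map (fun v => h v v)).sum + pvP (fun v w => h v w + h w v) k := by
  induction k with
  | nil => simp [pvP]
  | cons x xs ih =>
      simp only [List.map_cons, List.sum_cons, pvP]
      rw [PySem.List.sum_map_add_int xs (fun v => h v x) (fun v => (xs.map (h v)).sum),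
          ih, PySem.List.sum_map_add_int xs (h x) (fun w => h w x)]
      ring

lemma pvVals_pairwise (l : List Int) : (pvVals l).Pairwise (· < ·) :=
  PySem.List.sorted_ofList_pairwise_lt l

lemma pvVals_nodup (l : List Int) : (pvVals l).Nodup :=
  (pvVals_pairwise l).imp ne_of_lt

lemma mem_pvVals (l : List Int) (v : Int) : v ∈ pvVals l ↔ v ∈ l := by
  rw [pvVals, PySem.List.mem_sorted, PySem.Set.mem_ofList]

-- a sum over the row regrouped as a count-weighted sum over its distinct values
lemma countSum (l : List Int) (g : Int → Int) :
    (l.map g).sum = ((pvVals l).map (fun v => pvC l v * g v)).sum := by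
  rw [Finset.sum_list_map_count]
  have hset : l.toFinset = (pvVals l).toFinset := by
    ext v; simp [List.mem_toFinset, mem_pvVals]
  rw [hset, ← List.sum_toFinset _ (pvVals_nodup l)]
  refine Finset.sum_congr rfl fun v hv => ?_
  simp [pvC]

-- the central counting identity: the all-pairs sum equals B's value-level form
lemma main_count (l : List Int) (h0 : l.count 0 ≤ 1) :
    pvP pvF l
      = ((pvVals l).map (fun v => PySem.Int.floordiv (pvC l v * (pvC l v - 1)) 2)).sum
        + pvP (pvG l) (pvVals l) := by
  set k := pvVals l with hk
  set c := pvC l with hc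
  have e1 : (l.map (fun a => (l.map (pvF a)).sum)).sum
      = (l.map (fun a => pvF a a)).sum + 2 * pvP pvF l := by
    rw [pvDouble]
    congr 1
    have : (fun (a b : Int) => pvF a b + pvF b a) = fun a b => 2 * pvF a b := by
      funext a b; rw [pvF_comm b a]; ring
    rw [this, pvP_two]
  have e2 : (l.map (fun a => (l.map (pvF a)).sum)).sum
      = (k.map (fun v => (k.map (fun w => c v * (c w * pvF v w))).sum)).sum := by
    have inner : (fun (a : Int) => (l.map (pvF a)).sum)
        = fun a => (k.map (fun w => c w * pvF a w)).sum := by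
      funext a; exact countSum l (pvF a)
    rw [inner, countSum l]
    refine congrArg _ (List.map_congr_left fun v _ => ?_)
    rw [← List.sum_map_mul_left]
  have e3 : (k.map (fun v => (k.map (fun w => c v * (c w * pvF v w))).sum)).sum
      = (k.map (fun v => c v * (c v * pvF v v))).sum
        + 2 * pvP (fun v w => c v * (c w * pvF v w)) k := by
    rw [pvDouble]
    congr 1
    have : (fun (v w : Int) => c v * (c w * pvF v w) + c w * (c v * pvF w v))
        = fun v w => 2 * (c v * (c w * pvF v w)) := by
      funext v w; rw [pvF_comm w v]; ring
    rw [this, pvP_two]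
  have e4 : (l.map (fun a => pvF a a)).sum = (k.map (fun v => c v * pvF v v)).sum :=
    countSum l _
  have e5 : pvP (pvG l) k = pvP (fun v w => c v * (c w * pvF v w)) k := by
    refine pvP_congr_pairwise _ _ k (pvVals_pairwise l) fun v w hvw => ?_
    have hmin : min v w = v := min_eq_left hvw.le
    have hmax : max v w = w := max_eq_right hvw.le
    simp only [pvG, pvF, hmin, hmax, ← hc]
    split_ifs with h
    · ring
    · ring
  have e6 : ∀ v ∈ k, 2 * PySem.Int.floordiv (c v * (c v - 1)) 2 + c v * pvF v v
      = c v * (c v * pvF v v) := by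
    intro v hv
    rcases Int.even_mul_pred_self (c v) with ⟨m, hm⟩
    have hfd : PySem.Int.floordiv (c v * (c v - 1)) 2 = m := by
      have : c v * (c v - 1) = 2 * m := by omega
      show Int.fdiv _ _ = m
      rw [this, Int.mul_fdiv_cancel_left m (by norm_num)]
    rw [hfd]
    by_cases hv0 : v = 0
    · have hvl : v ∈ l := (mem_pvVals l v).mp hv
      have h1 : 1 ≤ l.count v := List.count_pos_iff.mpr hvl
      have hc1 : c v = 1 := by
        simp only [hc, pvC]; subst hv0; omega
      have hm0 : m = 0 := by rw [hc1] at hm; omega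
      rw [hc1, hm0]; ring
    · have : pvF v v = 1 := by
        simp only [pvF, max_self, min_self, PySem.Int.mod_eq_zero_iff_dvd, dvd_refl, if_true]
        exact Int.fdiv_self hv0
      rw [this]
      linear_combination -hm
  have key : 2 * pvP pvF l
      = 2 * (((k.map (fun v => PySem.Int.floordiv (c v * (c v - 1)) 2)).sum) + pvP (pvG l) k) := by
    have lhs := e1
    rw [e2, e3, e4] at lhs
    rw [e5]
    have diag : (k.map (fun v => c v * (c v * pvF v v))).sum
        = (k.map (fun v => 2 * PySem.Int.floordiv (c v * (c v - 1)) 2 + c v * pvF v v)).sum :=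
      congrArg _ (List.map_congr_left fun v hv => (e6 v hv).symm)
    rw [diag, PySem.List.sum_map_add_int] at lhs
    have h2 : ((k.map (fun v => 2 * PySem.Int.floordiv (c v * (c v - 1)) 2)).sum)
        = 2 * (k.map (fun v => PySem.Int.floordiv (c v * (c v - 1)) 2)).sum := by
      rw [List.sum_map_mul_left]
    rw [h2] at lhs
    linarith [lhs]
  omega

-- ----- port A reduces to pvP pvF per row -----

lemma foldl_ite_add (l : List Int) (x t : Int) :
    l.foldl (fun acc y =>
      if PySem.Int.mod (max x y) (min x y) = 0
      then acc + PySem.Int.floordiv (max x y) (min x y) else acc) t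
    = t + (l.map (pvF x)).sum := by
  have h : (fun (acc y : Int) =>
      if PySem.Int.mod (max x y) (min x y) = 0
      then acc + PySem.Int.floordiv (max x y) (min x y) else acc)
      = fun acc y => acc + pvF x y := by
    funext acc y; simp only [pvF]; split_ifs <;> simp
  rw [h, PySem.List.foldl_add]

lemma natIdx (row : List Int) (t : Int) :
    (List.range (row.length - 1)).foldl
      (fun t k => t + ((row.drop (k + 1)).map (pvF (row.getD k 0))).sum) t
    = t + pvP pvF row := by
  induction row generalizing t with
  | nil => simp [pvP]
  | cons x xs ih =>
      cases xs with
      | nil => simp [pvP]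
      | cons z zs =>
          have hlen : (x :: z :: zs).length - 1 = zs.length + 1 := by simp
          rw [hlen, List.range_succ_eq_map, List.foldl_cons, List.foldl_map]
          simp only [List.drop_succ_cons, List.getD_cons_succ, Nat.succ_eq_add_one,
            List.drop_zero, List.getD_cons_zero]
          have h2 := ih (t + ((z :: zs).map (pvF x)).sum)
          simp only [List.length_cons, Nat.add_sub_cancel, List.drop_succ_cons] at h2
          rw [h2]
          simp [pvP]; ring

lemma perRowA (row : List Int) (t : Int) :
    (PySem.List.pyRange 0 ((row.length : Int) - 1)).foldl (fun total i =>
      (PySem.List.pyRange (i + 1) (row.length : Int)).foldl (fun total j =>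
        let n1 := PySem.List.pyGetD row i 0
        let n2 := PySem.List.pyGetD row j 0
        let mx := max n1 n2
        let mn := min n1 n2
        if PySem.Int.mod mx mn = 0 then total + PySem.Int.floordiv mx mn else total)
        total) t
    = t + pvP pvF row := by
  have step1 : ∀ (tt i : Int), 0 ≤ i →
      (PySem.List.pyRange (i + 1) (row.length : Int)).foldl (fun total j =>
        let n1 := PySem.List.pyGetD row i 0
        let n2 := PySem.List.pyGetD row j 0
        let mx := max n1 n2
        let mn := min n1 n2
        if PySem.Int.mod mx mn = 0 then total + PySem.Int.floordiv mx mn else total) tt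
      = tt + ((row.drop (i.toNat + 1)).map (pvF (PySem.List.pyGetD row i 0))).sum := by
    intro tt i hi
    have h := PySem.List.foldl_pyRange_pyGetD' row 0
      (fun acc y => if PySem.Int.mod (max (PySem.List.pyGetD row i 0) y)
          (min (PySem.List.pyGetD row i 0) y) = 0
        then acc + PySem.Int.floordiv (max (PySem.List.pyGetD row i 0) y)
          (min (PySem.List.pyGetD row i 0) y) else acc) tt (a := i + 1) (by omega)
    simp only at h
    have htn : (i + 1).toNat = i.toNat + 1 := by omega
    rw [h, htn, foldl_ite_add]
  rw [PySem.List.foldl_congr_mem _ _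
      (fun tt i => tt + ((row.drop (i.toNat + 1)).map (pvF (PySem.List.pyGetD row i 0))).sum) t
      (fun tt i hi => step1 tt i (PySem.List.mem_pyRange_one.mp hi).1)]
  cases row with
  | nil => simp [pvP]
  | cons x xs =>
      have hlen : ((x :: xs).length : Int) - 1 = ((xs.length : Nat) : Int) := by
        simp
      rw [hlen, PySem.List.pyRange_zero_nat, List.foldl_map]
      have hbody : (fun (tt : Int) (k : Nat) =>
          tt + (((x :: xs).drop ((k : Int).toNat + 1)).map
            (pvF (PySem.List.pyGetD (x :: xs) (k : Int) 0))).sum)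
          = fun tt k => tt + (((x :: xs).drop (k + 1)).map (pvF ((x :: xs).getD k 0))).sum := by
        funext tt k
        simp [PySem.List.pyGetD_natCast]
      rw [hbody]
      have := natIdx (x :: xs) t
      simpa using this

-- ----- port B reduces to the value-level form per row -----

lemma altRowEq (l : List Int) (vals : List Int) (t : Int) :
    solveAltRow (PySem.Dict.counter l) vals t
      = t + (vals.map (fun v => PySem.Int.floordiv (pvC l v * (pvC l v - 1)) 2)).sum
          + pvP (pvG l) vals := by
  induction vals generalizing t with
  | nil => simp [solveAltRow, pvP]
  | cons lo vs ih =>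
      simp only [solveAltRow]
      have hinner : ∀ tt : Int, vs.foldl (fun t hi =>
          if PySem.Int.mod hi lo = 0
          then t + PySem.Int.floordiv hi lo * ((PySem.Dict.counter l).getD lo 0)
            * (PySem.Dict.counter l).getD hi 0 else t) tt
          = tt + (vs.map (pvG l lo)).sum := by
        intro tt
        have hb : (fun (t hi : Int) =>
            if PySem.Int.mod hi lo = 0
            then t + PySem.Int.floordiv hi lo * ((PySem.Dict.counter l).getD lo 0)
              * (PySem.Dict.counter l).getD hi 0 else t)
            = fun t hi => t + pvG l lo hi := by
          funext t hi
          simp only [PySem.Dict.getD_counter, pvG, pvC]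
          split_ifs <;> simp
        rw [hb, PySem.List.foldl_add]
      rw [hinner, ih, PySem.Dict.getD_counter]
      simp only [pvP, pvC, List.map_cons, List.sum_cons]
      ring

-- ----- whole-board assembly -----

lemma solveA_eq (board : List (List Int)) :
    solve board = board.foldl (fun t row => t + pvP pvF row) 0 := by
  unfold solve
  exact PySem.List.foldl_congr_mem board _ _ 0 (fun t row _ => perRowA row t)

lemma solveB_eq (board : List (List Int)) :
    solve_alt board = board.foldl (fun t row => t
      + ((pvVals row).map (fun v => PySem.Int.floordiv (pvC row v * (pvC row v - 1)) 2)).sum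
      + pvP (pvG row) (pvVals row)) 0 := by
  unfold solve_alt
  refine PySem.List.foldl_congr_mem board _ _ 0 (fun t row _ => ?_)
  simp only [PySem.Dict.foldl_insert_getD_add_one_eq_counter, PySem.Dict.keys_counter]
  exact altRowEq row (pvVals row) t

-- ===== VERDICT (by name: the statement is the Claim_ definition above) =====
theorem solve_spec : Claim_equal_solve := by
  intro board _hdom hpre
  unfold Spec_solve
  rw [solveA_eq, solveB_eq]
  refine PySem.List.foldl_congr_mem board _ _ 0 (fun t row hrow => ?_)
  rw [main_count row (hpre row hrow).1]
  ring
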